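-- pv_equiv track=rewrite | github.com/deluair/Semiconductor-Industry-Consulting | main.py | transform_yearly_results_to_trajectories
-- ===== SOURCE A (Python) =====
-- from collections import defaultdict
--
-- def transform_yearly_results_to_trajectories(yearly_results: dict) -> dict:
--     """
--     Transforms simulation results from {year: {category: [model_states]}}
--     to {category: {model_id: [{year: year, **attributes}]}}.
--     """
--     trajectories = defaultdict(lambda: defaultdict(list))
--     sorted_years = sorted(yearly_results.keys())
--
--     for year in sorted_years:
--         year_data = yearly_results[year]
--         for category, model_list in year_data.items():
--             for model_state in model_list:
--                 model_id = model_state['model_id']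
--                 # Add year to the state attributes for the trajectory
--                 state_with_year = {'year': year, **model_state}
--                 trajectories[category][model_id].append(state_with_year)
--     return dict(trajectories)
-- ===== SOURCE B (Python) =====
-- def transform_yearly_results_to_trajectories(yearly_results: dict) -> dict:
--     """
--     Transforms simulation results from {year: {category: [model_states]}}
--     to {category: {model_id: [{year: year, **attributes}]}}.
--
--     Different decomposition: instead of accumulating into nested defaultdicts
--     during one ordered pass, first collect the (category, model_id) pairs in
--     order of first appearance, then build each trajectory independently by
--     scanning the year-sorted data for that pair.
--     """
--     items = sorted(yearly_results.items(), key=lambda kv: kv[0])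
--     pairs = []  # (category, model_id) in order of first appearance
--     for _, year_data in items:
--         for category, model_list in year_data.items():
--             for model_state in model_list:
--                 p = (category, model_state['model_id'])
--                 if p not in pairs:
--                     pairs.append(p)
--     result = {}
--     for category, model_id in pairs:
--         trajectory = [{'year': year, **model_state}
--                       for year, year_data in items
--                       for model_state in year_data.get(category, [])
--                       if model_state['model_id'] == model_id]
--         result.setdefault(category, {})[model_id] = trajectory
--     return result
-- ===== Notes on version B (the rewrite author's own statement) =====
-- stated objective: alternative
-- what changed: Instead of accumulating every state into nested defaultdicts during one ordered pass, B first collects the (category, model_id) pairs in first-appearance order and then builds each model's trajectory independently by filtering the year-sorted data for that pair.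
import Mathlib
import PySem

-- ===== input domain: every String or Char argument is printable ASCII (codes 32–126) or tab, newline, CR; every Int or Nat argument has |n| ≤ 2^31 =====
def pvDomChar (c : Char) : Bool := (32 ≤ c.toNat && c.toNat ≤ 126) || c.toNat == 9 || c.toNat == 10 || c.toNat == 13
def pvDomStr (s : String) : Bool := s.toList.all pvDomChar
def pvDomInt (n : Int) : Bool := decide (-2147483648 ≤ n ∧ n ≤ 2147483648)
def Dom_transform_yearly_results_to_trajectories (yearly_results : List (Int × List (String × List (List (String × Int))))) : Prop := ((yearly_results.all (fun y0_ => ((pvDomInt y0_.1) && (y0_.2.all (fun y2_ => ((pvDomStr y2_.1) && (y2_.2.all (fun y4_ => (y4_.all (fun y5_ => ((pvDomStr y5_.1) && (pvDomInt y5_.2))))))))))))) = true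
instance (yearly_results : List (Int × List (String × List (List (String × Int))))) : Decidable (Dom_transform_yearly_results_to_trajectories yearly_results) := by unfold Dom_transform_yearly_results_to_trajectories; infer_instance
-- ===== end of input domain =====

-- B builds each (category, model_id) trajectory independently by filtering the year-sorted data,
-- instead of A's single ordered pass accumulating into nested defaultdicts (alternative decomposition).
-- ===== PORT A =====
-- Shared primitive of both Pythons: model_state['model_id'] (Pre_ guarantees the key is present)
def pvModelId (model_state : List (String × Int)) : Int :=
  (PySem.Dict.mk model_state).getD "model_id" 0

-- Shared primitive of both Pythons: {'year': year, **model_state} as an assoc list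
def pvWithYear (year : Int) (model_state : List (String × Int)) : List (String × Int) :=
  (model_state.foldl (fun d kv => d.insert kv.1 kv.2)
    (PySem.Dict.mk [("year", year)])).items

def transform_yearly_results_to_trajectories (yearly_results : List (Int × List (String × List (List (String × Int))))) : List (String × List (Int × List (List (String × Int)))) :=
  let sorted_years := PySem.List.sorted (yearly_results.map (fun kv => kv.1)) (fun x => x) false
  let trajectories : PySem.Dict String (PySem.Dict Int (List (List (String × Int)))) :=
    sorted_years.foldl (fun d year =>
      let year_data := (PySem.Dict.mk yearly_results).getD year []
      year_data.foldl (fun d cm =>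
        cm.2.foldl (fun d model_state =>
          -- trajectories[category][model_id].append({'year': year, **model_state})
          d.modify cm.1 PySem.Dict.empty (fun inner =>
            inner.modify (pvModelId model_state) [] (fun l => l ++ [pvWithYear year model_state]))) d) d)
      PySem.Dict.empty
  trajectories.items.map (fun ci => (ci.1, ci.2.items))

-- ===== PORT B =====
def transform_yearly_results_to_trajectories_alt (yearly_results : List (Int × List (String × List (List (String × Int))))) : List (String × List (Int × List (List (String × Int)))) :=
  let items := PySem.List.sorted yearly_results (fun kv => kv.1) false
  let pairs : List (String × Int) :=
    items.foldl (fun ps kv =>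
      kv.2.foldl (fun ps cm =>
        cm.2.foldl (fun ps model_state =>
          let p := (cm.1, pvModelId model_state)
          if p ∈ ps then ps else ps ++ [p]) ps) ps) []
  let result : PySem.Dict String (PySem.Dict Int (List (List (String × Int)))) :=
    pairs.foldl (fun d p =>
      let trajectory := items.flatMap (fun kv =>
        (((PySem.Dict.mk kv.2).getD p.1 []).filter
            (fun model_state => pvModelId model_state == p.2)).map
          (fun model_state => pvWithYear kv.1 model_state))
      -- result.setdefault(category, {})[model_id] = trajectory
      d.modify p.1 PySem.Dict.empty (fun inner => inner.insert p.2 trajectory)) PySem.Dict.empty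
  result.items.map (fun ci => (ci.1, ci.2.items))

-- ===== PRECONDITION & SPEC =====
-- Pre_ excludes (a) association-list inputs with duplicate dict keys (a real Python dict cannot
-- have them, so which entry wins is a representation artefact) and (b) states lacking a
-- 'model_id' key, on which the Python A raises KeyError.
def Pre_transform_yearly_results_to_trajectories (yearly_results : List (Int × List (String × List (List (String × Int))))) : Prop :=
  (yearly_results.map (fun kv => kv.1)).Nodup ∧
  (∀ y ∈ yearly_results, (y.2.map (fun cm => cm.1)).Nodup) ∧
  (∀ y ∈ yearly_results, ∀ cm ∈ y.2, ∀ s ∈ cm.2, "model_id" ∈ s.map (fun kv => kv.1))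
instance (yearly_results : List (Int × List (String × List (List (String × Int))))) : Decidable (Pre_transform_yearly_results_to_trajectories yearly_results) := by unfold Pre_transform_yearly_results_to_trajectories; infer_instance

def pvWitness_transform_yearly_results_to_trajectories : (List (Int × List (String × List (List (String × Int))))) :=
  [(2024, [("logic", [[("model_id", 1), ("x", 3)], [("model_id", 2)]])]),
   (2023, [("logic", [[("model_id", 1), ("x", 5)]]), ("memory", [[("model_id", 7), ("year", 9)]])])]

def Spec_transform_yearly_results_to_trajectories (yearly_results : List (Int × List (String × List (List (String × Int))))) (out : List (String × List (Int × List (List (String × Int))))) : Prop := out = transform_yearly_results_to_trajectories_alt yearly_results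
instance (yearly_results : List (Int × List (String × List (List (String × Int))))) (out : List (String × List (Int × List (List (String × Int))))) : Decidable (Spec_transform_yearly_results_to_trajectories yearly_results out) := by
  unfold Spec_transform_yearly_results_to_trajectories
  haveI : DecidableEq (String × List (Int × List (List (String × Int)))) := instDecidableEqProd
  infer_instance

-- ===== CLAIM (what is proved, stated in full; the proofs are below) =====
def Claim_equal_transform_yearly_results_to_trajectories : Prop := ∀ (yearly_results : List (Int × List (String × List (List (String × Int))))), Dom_transform_yearly_results_to_trajectories yearly_results → Pre_transform_yearly_results_to_trajectories yearly_results → Spec_transform_yearly_results_to_trajectories yearly_results (transform_yearly_results_to_trajectories yearly_results)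

-- ===== LEMMAS AND PROOFS =====

def pvTraj (yearly_results : List (Int × List (String × List (List (String × Int))))) (c : String) (m : Int) : List (List (String × Int)) :=
  (PySem.List.sorted yearly_results (fun kv => kv.1) false).flatMap (fun kv =>
    (((PySem.Dict.mk kv.2).getD c []).filter
        (fun model_state => pvModelId model_state == m)).map
      (fun model_state => pvWithYear kv.1 model_state))


theorem add_eq_if {α : Type} [BEq α] [LawfulBEq α] (s : List α) (x : α) :
    PySem.Set.add s x = if x ∈ s then s else s ++ [x] := by
  simp [PySem.Set.add, PySem.Set.contains]

theorem dedup_append_singleton {α : Type} [BEq α] [LawfulBEq α] (l : List α) (x : α) :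
    PySem.List.dedup (l ++ [x]) = if x ∈ l then PySem.List.dedup l else PySem.List.dedup l ++ [x] := by
  rw [PySem.List.dedup_eq_ofList, PySem.List.dedup_eq_ofList, PySem.Set.ofList_eq_foldl,
    PySem.Set.ofList_eq_foldl, List.foldl_append, List.foldl_cons, List.foldl_nil, add_eq_if]
  have : x ∈ l.foldl PySem.Set.add [] ↔ x ∈ l := by
    rw [← PySem.Set.ofList_eq_foldl, ← PySem.List.dedup_eq_ofList]; exact PySem.List.mem_dedup ..
  by_cases h : x ∈ l <;> simp [h, this]

theorem mem_dedup_iff {α : Type} [BEq α] [LawfulBEq α] (l : List α) (x : α) :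
    x ∈ PySem.List.dedup l ↔ x ∈ l := PySem.List.mem_dedup ..

theorem dedup_map_dedup {α β : Type} [BEq α] [LawfulBEq α] [BEq β] [LawfulBEq β] (l : List α) (f : α → β) :
    PySem.List.dedup ((PySem.List.dedup l).map f) = PySem.List.dedup (l.map f) := by
  induction l using List.reverseRecOn with
  | nil => rfl
  | append_singleton l x ih =>
    rw [dedup_append_singleton, List.map_append, List.map_cons, List.map_nil]
    by_cases h : x ∈ l
    · rw [if_pos h, ih, dedup_append_singleton, if_pos (List.mem_map.mpr ⟨x, h, rfl⟩)]
    · rw [if_neg h, List.map_append, List.map_cons, List.map_nil, dedup_append_singleton,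
        dedup_append_singleton]
      by_cases hf : f x ∈ l.map f
      · have h2 : f x ∈ (PySem.List.dedup l).map f := by
          obtain ⟨y, hy, hey⟩ := List.mem_map.mp hf
          exact List.mem_map.mpr ⟨y, (mem_dedup_iff l y).mpr hy, hey⟩
        rw [if_pos h2, if_pos hf, ih]
      · have h2 : f x ∉ (PySem.List.dedup l).map f := by
          intro q; obtain ⟨y, hy, hey⟩ := List.mem_map.mp q
          exact hf (List.mem_map.mpr ⟨y, (mem_dedup_iff l y).mp hy, hey⟩)
        rw [if_neg h2, if_neg hf, ih]

theorem filter_dedup {α : Type} [BEq α] [LawfulBEq α] (l : List α) (p : α → Bool) :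
    (PySem.List.dedup l).filter p = PySem.List.dedup (l.filter p) := by
  induction l using List.reverseRecOn with
  | nil => rfl
  | append_singleton l x ih =>
    rw [dedup_append_singleton, List.filter_append, List.filter_cons, List.filter_nil]
    by_cases hp : p x
    · rw [if_pos hp]
      by_cases h : x ∈ l
      · rw [if_pos h, ih, dedup_append_singleton, if_pos (List.mem_filter.mpr ⟨h, hp⟩)]
      · rw [if_neg h, List.filter_append, List.filter_cons, if_pos hp, List.filter_nil, ih,
          dedup_append_singleton, if_neg (fun hx => h (List.mem_of_mem_filter hx))]
    · rw [if_neg hp, List.append_nil]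
      by_cases h : x ∈ l
      · rw [if_pos h, ih]
      · rw [if_neg h, List.filter_append, List.filter_cons, if_neg hp, List.filter_nil,
          List.append_nil, ih]

theorem dedup_const_fst {α β : Type} [BEq α] [LawfulBEq α] [BEq β] [LawfulBEq β] (l : List (α × β)) (c : α)
    (h : ∀ x ∈ l, x.1 = c) :
    PySem.List.dedup l = (PySem.List.dedup (l.map (fun x => x.2))).map (fun m => (c, m)) := by
  induction l using List.reverseRecOn with
  | nil => rfl
  | append_singleton l x ih =>
    have hx : x.1 = c := h x (by simp)
    have hl : ∀ y ∈ l, y.1 = c := fun y hy => h y (by simp [hy])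
    rw [dedup_append_singleton, List.map_append, List.map_cons, List.map_nil, dedup_append_singleton]
    have hmem : x ∈ l ↔ x.2 ∈ l.map (fun x => x.2) := by
      constructor
      · intro hm; exact List.mem_map.mpr ⟨x, hm, rfl⟩
      · intro q
        obtain ⟨y, hy, hey⟩ := List.mem_map.mp q
        have : y = x := Prod.ext (by rw [hl y hy, hx]) hey
        rwa [← this]
    by_cases hm : x ∈ l
    · rw [if_pos hm, if_pos (hmem.mp hm), ih hl]
    · rw [if_neg hm, if_neg (fun q => hm (hmem.mpr q)), ih hl, List.map_append, List.map_cons,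
        List.map_nil]
      rw [← hx]

def pvStepA (d : PySem.Dict String (PySem.Dict Int (List (List (String × Int)))))
    (t : String × Int × List (String × Int)) :
    PySem.Dict String (PySem.Dict Int (List (List (String × Int)))) :=
  d.modify t.1 PySem.Dict.empty (fun inner => inner.modify t.2.1 [] (fun l => l ++ [t.2.2]))

def pvSpec (L : List (String × Int × List (String × Int))) :
    List (String × List (Int × List (List (String × Int)))) :=
  (PySem.List.dedup (L.map (fun t => t.1))).map (fun c =>
    (c, (PySem.List.dedup (((L.filter (fun t => t.1 == c)).map (fun t => t.2)).map (fun p => p.1))).map (fun m =>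
      (m, (((L.filter (fun t => t.1 == c)).map (fun t => t.2)).filter (fun p => p.1 == m)).map (fun p => p.2)))))

theorem getD_foldl_modify_filter' {κ α ν : Type} [BEq κ] [LawfulBEq κ] [DecidableEq κ]
    (L : List α) (k : α → κ) (v0 : ν) (g : α → ν → ν) (d : PySem.Dict κ ν) (c : κ) :
    (L.foldl (fun d t => d.modify (k t) v0 (g t)) d).getD c v0
      = (L.filter (fun t => k t == c)).foldl (fun acc t => g t acc) (d.getD c v0) := by
  induction L generalizing d with
  | nil => rfl
  | cons t L ih =>
    simp only [List.foldl_cons, List.filter_cons]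
    rw [ih]
    by_cases h : k t = c
    · simp [h]
    · rw [PySem.Dict.getD_modify, if_neg (Ne.symm h)]
      simp [h]

theorem flatten_foldA (L : List (String × Int × List (String × Int))) :
    ((L.foldl pvStepA PySem.Dict.empty).items.map (fun ci => (ci.1, ci.2.items))) = pvSpec L := by
  have hkeys : (L.foldl pvStepA PySem.Dict.empty).keys = PySem.List.dedup (L.map (fun t => t.1)) := by
    have := PySem.Dict.keys_foldl_modify_key L (fun t => t.1) PySem.Dict.empty
      (fun _ t => fun inner => inner.modify t.2.1 [] (fun l => l ++ [t.2.2])) PySem.Dict.empty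
    simpa [pvStepA, PySem.Dict.keys_empty, PySem.Set.update_nil_left] using this
  have hnd : (L.foldl pvStepA PySem.Dict.empty).keys.Nodup := by
    have := PySem.Dict.nodup_keys_foldl_modify_key L (fun t => t.1) PySem.Dict.empty
      (fun _ t => fun inner => inner.modify t.2.1 [] (fun l => l ++ [t.2.2])) PySem.Dict.empty
      PySem.Dict.nodup_keys_empty
    simpa [pvStepA] using this
  rw [PySem.Dict.items_eq_map_keys _ hnd PySem.Dict.empty, hkeys, List.map_map, pvSpec]
  apply List.map_congr_left
  intro c hc
  simp only [Function.comp_apply]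
  congr 1
  -- inner dict at key c
  have hget : (L.foldl pvStepA PySem.Dict.empty).getD c PySem.Dict.empty
      = ((L.filter (fun t => t.1 == c)).map (fun t => t.2)).foldl
          (fun d p => d.modify p.1 [] (fun l => l ++ [p.2])) PySem.Dict.empty := by
    rw [List.foldl_map]
    have := getD_foldl_modify_filter' L (fun t => t.1) PySem.Dict.empty
      (fun t inner => inner.modify t.2.1 [] (fun l => l ++ [t.2.2])) PySem.Dict.empty c
    simpa [pvStepA, PySem.Dict.getD_empty] using this
  rw [hget]
  set P := (L.filter (fun t => t.1 == c)).map (fun t => t.2) with hP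
  have hkeys2 : ((P.foldl (fun d p => d.modify p.1 [] (fun l => l ++ [p.2])) PySem.Dict.empty)).keys
      = PySem.List.dedup (P.map (fun p => p.1)) := by
    have := PySem.Dict.keys_foldl_modify_key P (fun p => p.1) ([] : List (List (String × Int)))
      (fun _ p => fun l => l ++ [p.2]) PySem.Dict.empty
    simpa [PySem.Dict.keys_empty, PySem.Set.update_nil_left] using this
  have hnd2 : ((P.foldl (fun d p => d.modify p.1 [] (fun l => l ++ [p.2])) PySem.Dict.empty)).keys.Nodup := by
    have := PySem.Dict.nodup_keys_foldl_modify_key P (fun p => p.1) ([] : List (List (String × Int)))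
      (fun _ p => fun l => l ++ [p.2]) PySem.Dict.empty PySem.Dict.nodup_keys_empty
    simpa using this
  rw [PySem.Dict.items_eq_map_keys _ hnd2 [], hkeys2]
  apply List.map_congr_left
  intro m hm
  congr 1
  have := PySem.Dict.getD_foldl_modify_append P PySem.Dict.empty m
  simpa [PySem.Dict.getD_empty] using this

def pvL (yearly_results : List (Int × List (String × List (List (String × Int))))) : List (String × Int × List (String × Int)) :=
  (PySem.List.sorted yearly_results (fun kv => kv.1) false).flatMap (fun kv =>
    kv.2.flatMap (fun cm => cm.2.map (fun s => (cm.1, pvModelId s, pvWithYear kv.1 s))))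

theorem sorted_map_fst (yr : List (Int × List (String × List (List (String × Int)))))
    (h1 : (yr.map (fun kv => kv.1)).Nodup) :
    PySem.List.sorted (yr.map (fun kv => kv.1)) (fun x => x) false
      = (PySem.List.sorted yr (fun kv => kv.1) false).map (fun kv => kv.1) := by
  apply PySem.List.sorted_eq_of_perm_of_pairwise_lt
  · exact (PySem.List.sorted_perm yr (fun kv => kv.1) false).map (fun kv => kv.1)
  · have hle : List.Pairwise (fun a b : Int × _ => a.1 ≤ b.1) (PySem.List.sorted yr (fun kv => kv.1) false) :=
      PySem.List.sorted_pairwise yr (fun kv => kv.1)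
    have hnd : ((PySem.List.sorted yr (fun kv => kv.1) false).map (fun kv => kv.1)).Nodup := by
      have := ((PySem.List.sorted_perm yr (fun kv => kv.1) false).map (fun kv => kv.1)).nodup_iff
      exact this.mpr h1
    have hne : List.Pairwise (fun a b : Int => a ≠ b) ((PySem.List.sorted yr (fun kv => kv.1) false).map (fun kv => kv.1)) := hnd
    have hle' : List.Pairwise (fun a b : Int => a ≤ b) ((PySem.List.sorted yr (fun kv => kv.1) false).map (fun kv => kv.1)) :=
      List.Pairwise.map _ (fun a b h => h) hle
    exact (hle'.and hne).imp (fun h => lt_of_le_of_ne h.1 h.2)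

theorem A_norm (yr : List (Int × List (String × List (List (String × Int)))))
    (h1 : (yr.map (fun kv => kv.1)).Nodup) :
    transform_yearly_results_to_trajectories yr
      = ((pvL yr).foldl pvStepA PySem.Dict.empty).items.map (fun ci => (ci.1, ci.2.items)) := by
  simp only [transform_yearly_results_to_trajectories]
  rw [sorted_map_fst yr h1, List.foldl_map, pvL]
  simp only [List.foldl_flatMap, List.foldl_map]
  congr 2
  apply PySem.List.foldl_congr_mem
  intro acc kv hkv
  have hmem : kv ∈ yr := (PySem.List.mem_sorted ..).mp hkv
  have hget : (PySem.Dict.mk yr).getD kv.1 [] = kv.2 := by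
    apply PySem.Dict.getD_of_mem_items (d := PySem.Dict.mk yr) (k := kv.1) (v := kv.2)
    · exact hmem
    · simpa [PySem.Dict.keys_mk] using h1
  simp only [hget, pvStepA]

theorem flatten_foldB (P : List (String × Int)) (hnd : P.Nodup)
    (tr : String → Int → List (List (String × Int))) :
    ((P.foldl (fun d p => d.modify p.1 PySem.Dict.empty
        (fun inner => inner.insert p.2 (tr p.1 p.2))) PySem.Dict.empty).items.map
      (fun ci => (ci.1, ci.2.items)))
      = (PySem.List.dedup (P.map (fun p => p.1))).map (fun c =>
          (c, (P.filter (fun p => p.1 == c)).map (fun p => (p.2, tr c p.2)))) := by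
  have hkeys : (P.foldl (fun d p => d.modify p.1 PySem.Dict.empty
      (fun inner => inner.insert p.2 (tr p.1 p.2))) PySem.Dict.empty).keys
      = PySem.List.dedup (P.map (fun p => p.1)) := by
    have := PySem.Dict.keys_foldl_modify_key P (fun p => p.1) PySem.Dict.empty
      (fun _ p => fun inner => inner.insert p.2 (tr p.1 p.2)) PySem.Dict.empty
    simpa [PySem.Dict.keys_empty, PySem.Set.update_nil_left] using this
  have hndk : (P.foldl (fun d p => d.modify p.1 PySem.Dict.empty
      (fun inner => inner.insert p.2 (tr p.1 p.2))) PySem.Dict.empty).keys.Nodup := by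
    have := PySem.Dict.nodup_keys_foldl_modify_key P (fun p => p.1) PySem.Dict.empty
      (fun _ p => fun inner => inner.insert p.2 (tr p.1 p.2)) PySem.Dict.empty
      PySem.Dict.nodup_keys_empty
    simpa using this
  rw [PySem.Dict.items_eq_map_keys _ hndk PySem.Dict.empty, hkeys, List.map_map]
  apply List.map_congr_left
  intro c hc
  simp only [Function.comp_apply]
  congr 1
  have hget : (P.foldl (fun d p => d.modify p.1 PySem.Dict.empty
      (fun inner => inner.insert p.2 (tr p.1 p.2))) PySem.Dict.empty).getD c PySem.Dict.empty
      = (P.filter (fun p => p.1 == c)).foldl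
          (fun inner p => inner.insert p.2 (tr p.1 p.2)) PySem.Dict.empty := by
    have := getD_foldl_modify_filter' P (fun p => p.1) PySem.Dict.empty
      (fun p inner => inner.insert p.2 (tr p.1 p.2)) PySem.Dict.empty c
    simpa [PySem.Dict.getD_empty] using this
  rw [hget]
  have hfresh : ∀ p ∈ P.filter (fun p => p.1 == c),
      (PySem.Dict.empty : PySem.Dict Int (List (List (String × Int)))).contains p.2 = false :=
    fun p _ => PySem.Dict.contains_empty ..
  have hsnd : ((P.filter (fun p => p.1 == c)).map (fun p => p.2)).Nodup := by
    refine List.Nodup.map_on ?_ (hnd.filter _)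
    intro x hx y hy hxy
    have hx1 : x.1 = c := by simpa using (List.mem_filter.mp hx).2
    have hy1 : y.1 = c := by simpa using (List.mem_filter.mp hy).2
    exact Prod.ext (hx1.trans hy1.symm) hxy
  have := PySem.Dict.items_foldl_insert_fresh (P.filter (fun p => p.1 == c))
    (fun p => p.2) (fun p => tr p.1 p.2) PySem.Dict.empty hfresh hsnd
  rw [this]
  simp only [List.nil_append, PySem.Dict.empty]
  apply List.map_congr_left
  intro p hp
  have : p.1 = c := by simpa using (List.mem_filter.mp hp).2
  rw [this]

theorem B_pairs (yr : List (Int × List (String × List (List (String × Int))))) :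
    ((PySem.List.sorted yr (fun kv => kv.1) false).foldl (fun ps kv =>
      kv.2.foldl (fun ps cm =>
        cm.2.foldl (fun (ps : List (String × Int)) model_state =>
          let p := (cm.1, pvModelId model_state)
          if p ∈ ps then ps else ps ++ [p]) ps) ps) [])
      = PySem.List.dedup ((pvL yr).map (fun t => (t.1, t.2.1))) := by
  rw [PySem.List.dedup_eq_ofList, ← PySem.Set.update_nil_left,
    PySem.Set.update_map_eq_foldl_add, pvL]
  simp only [List.foldl_flatMap, List.foldl_map, add_eq_if]

theorem B_norm (yr : List (Int × List (String × List (List (String × Int))))) :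
    transform_yearly_results_to_trajectories_alt yr
      = ((PySem.List.dedup ((pvL yr).map (fun t => (t.1, t.2.1)))).foldl
          (fun d p => d.modify p.1 PySem.Dict.empty
            (fun inner => inner.insert p.2 (pvTraj yr p.1 p.2))) PySem.Dict.empty).items.map
          (fun ci => (ci.1, ci.2.items)) := by
  simp only [transform_yearly_results_to_trajectories_alt]
  rw [B_pairs]
  rfl

theorem peryear (y : Int) (c : String) (m : Int)
    (yd : List (String × List (List (String × Int))))
    (hnd : (yd.map (fun cm => cm.1)).Nodup) :
    ((((yd.flatMap (fun cm => cm.2.map (fun s => (cm.1, pvModelId s, pvWithYear y s)))).filter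
        (fun t => t.1 == c)).map (fun t => t.2)).filter (fun p => p.1 == m)).map (fun p => p.2)
      = (((PySem.Dict.mk yd).getD c []).filter (fun s => pvModelId s == m)).map
          (fun s => pvWithYear y s) := by
  induction yd with
  | nil => simp [PySem.Dict.getD, PySem.Dict.get?]
  | cons kv t ih =>
    have hk : kv.1 ∉ t.map (fun cm => cm.1) := by
      have := hnd
      simp only [List.map_cons, List.nodup_cons] at this
      exact this.1
    have hndt : (t.map (fun cm => cm.1)).Nodup := by
      have := hnd
      simp only [List.map_cons, List.nodup_cons] at this
      exact this.2
    rw [PySem.Dict.getD_eq_get?_getD, PySem.Dict.get?_mk_cons]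
    simp only [List.flatMap_cons, List.filter_append, List.map_append]
    by_cases hkc : kv.1 = c
    · have htail : (t.flatMap (fun cm => cm.2.map (fun s => (cm.1, pvModelId s, pvWithYear y s)))).filter
          (fun t => t.1 == c) = [] := by
        rw [List.filter_eq_nil_iff]
        intro a ha
        obtain ⟨cm, hcm, hmem⟩ := List.mem_flatMap.mp ha
        obtain ⟨s, _, rfl⟩ := List.mem_map.mp hmem
        have h1 : cm.1 ∈ t.map (fun cm => cm.1) := List.mem_map.mpr ⟨cm, hcm, rfl⟩
        simp only [beq_iff_eq]
        intro hc
        rw [hc, ← hkc] at h1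
        exact hk h1
      rw [htail]
      simp [hkc, List.filter_map, List.map_map, Function.comp_def]
    · have hhead : (kv.2.map (fun s => (kv.1, pvModelId s, pvWithYear y s))).filter
          (fun t => t.1 == c) = [] := by
        rw [List.filter_eq_nil_iff]
        intro a ha
        obtain ⟨s, _, rfl⟩ := List.mem_map.mp ha
        simpa using hkc
      rw [hhead]
      have : (kv.1 == c) = false := by simpa using hkc
      rw [this]
      simpa [PySem.Dict.getD_eq_get?_getD] using ih hndt

theorem traj_eq (yr : List (Int × List (String × List (List (String × Int)))))
    (h2 : ∀ y ∈ yr, (y.2.map (fun cm => cm.1)).Nodup) (c : String) (m : Int) :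
    ((((pvL yr).filter (fun t => t.1 == c)).map (fun t => t.2)).filter
        (fun p => p.1 == m)).map (fun p => p.2) = pvTraj yr c m := by
  rw [pvL, pvTraj]
  simp only [List.filter_flatMap, List.map_flatMap]
  rw [List.flatMap_def, List.flatMap_def]
  apply congrArg List.flatten
  apply List.map_congr_left
  intro kv hkv
  have := peryear kv.1 c m kv.2 (h2 kv ((PySem.List.mem_sorted ..).mp hkv))
  simpa only [List.filter_flatMap, List.map_flatMap] using this

theorem B_eq_spec (yr : List (Int × List (String × List (List (String × Int)))))
    (h2 : ∀ y ∈ yr, (y.2.map (fun cm => cm.1)).Nodup) :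
    (PySem.List.dedup ((PySem.List.dedup ((pvL yr).map (fun t => (t.1, t.2.1)))).map
        (fun p => p.1))).map (fun c =>
      (c, ((PySem.List.dedup ((pvL yr).map (fun t => (t.1, t.2.1)))).filter
            (fun p => p.1 == c)).map (fun p => (p.2, pvTraj yr c p.2))))
      = pvSpec (pvL yr) := by
  rw [pvSpec, dedup_map_dedup]
  have hfst : ((pvL yr).map (fun t => (t.1, t.2.1))).map (fun p => p.1)
      = (pvL yr).map (fun t => t.1) := by
    rw [List.map_map]; rfl
  rw [hfst]
  apply List.map_congr_left
  intro c hc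
  congr 1
  rw [filter_dedup, List.filter_map]
  have hfilter : (pvL yr).filter ((fun p => p.1 == c) ∘ (fun t => (t.1, t.2.1)))
      = (pvL yr).filter (fun t => t.1 == c) := by
    apply List.filter_congr
    intro t _
    rfl
  rw [hfilter]
  rw [dedup_const_fst (((pvL yr).filter (fun t => t.1 == c)).map (fun t => (t.1, t.2.1))) c
    (by
      intro x hx
      obtain ⟨t, ht, rfl⟩ := List.mem_map.mp hx
      simpa using (List.mem_filter.mp ht).2)]
  rw [List.map_map, List.map_map, List.map_map]
  apply List.map_congr_left
  intro m hm
  simp only [Function.comp_apply]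
  congr 1
  exact (traj_eq yr h2 c m).symm

-- ===== VERDICT (by name: the statement is the Claim_ definition above) =====
theorem transform_yearly_results_to_trajectories_spec : Claim_equal_transform_yearly_results_to_trajectories := by
  intro yr _ hpre
  obtain ⟨h1, h2, _⟩ := hpre
  unfold Spec_transform_yearly_results_to_trajectories
  rw [A_norm yr h1, flatten_foldA, B_norm yr,
    flatten_foldB _ (PySem.List.nodup_dedup ..) (pvTraj yr), B_eq_spec yr h2]
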